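-- pv_equiv track=rewrite | github.com/jashanpreet8/Data-structures-and-algorithms-projects | jash6749_l05/src/functions.py | new_string
-- ===== SOURCE A (Python) =====
-- def new_string(s):
--     new = ''
--     if s != '':
--         if s[0].isalpha():
--             char = s[0].lower()
--             s = s[1:]
--             new = char + new_string(s)
--         else:
--             s = s[1:]
--             new = '' + new_string(s)
--
--     return new
-- ===== SOURCE B (Python) =====
-- def new_string(s):
--     return ''.join(c.lower() for c in s if c.isalpha())
-- ===== Notes on version B (the rewrite author's own statement) =====
-- stated objective: idiomatic
-- what changed: Replaces A's character-by-character recursion (with per-step string concatenation) by a single flat filter-and-lowercase pass joined into the result.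
import Mathlib
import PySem

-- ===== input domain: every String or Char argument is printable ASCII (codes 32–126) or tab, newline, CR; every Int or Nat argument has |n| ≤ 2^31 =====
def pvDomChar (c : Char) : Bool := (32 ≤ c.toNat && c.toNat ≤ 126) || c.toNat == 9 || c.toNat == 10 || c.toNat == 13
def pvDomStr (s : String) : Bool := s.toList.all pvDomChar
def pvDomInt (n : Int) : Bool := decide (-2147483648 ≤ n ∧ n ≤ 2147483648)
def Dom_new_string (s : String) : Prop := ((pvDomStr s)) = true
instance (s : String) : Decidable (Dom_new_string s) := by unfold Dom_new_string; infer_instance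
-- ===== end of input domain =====

-- B replaces A's recursion-over-the-string with one flat filter/lowercase pass joined into the result.
-- ===== PORT A =====
-- A's recursion, character by character over the string's char list:
def newStringRec : List Char → List Char
  | [] => []
  | c :: rest =>
    if PySem.Chars.isalpha c then
      PySem.Chars.lowerChar c :: newStringRec rest
    else
      newStringRec rest

def new_string (s : String) : String := String.ofList (newStringRec s.toList)

-- ===== PORT B =====
def new_string_alt (s : String) : String :=
  String.ofList ((s.toList.filter PySem.Chars.isalpha).map PySem.Chars.lowerChar)

-- ===== PRECONDITION & SPEC =====
def Spec_new_string (s : String) (out : String) : Prop := out = new_string_alt s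
instance (s : String) (out : String) : Decidable (Spec_new_string s out) := by unfold Spec_new_string; infer_instance

-- ===== CLAIM (what is proved, stated in full; the proofs are below) =====
def Claim_equal_new_string : Prop := ∀ (s : String), Dom_new_string s → Spec_new_string s (new_string s)

-- ===== LEMMAS AND PROOFS =====

-- ===== VERDICT (by name: the statement is the Claim_ definition above) =====
lemma newStringRec_eq_filter_map (l : List Char) :
    newStringRec l = (l.filter PySem.Chars.isalpha).map PySem.Chars.lowerChar := by
  induction l with
  | nil => rfl
  | cons c rest ih =>
    simp only [newStringRec, List.filter_cons]
    by_cases h : PySem.Chars.isalpha c = true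
    · simp [h, ih]
    · simp [h, ih]

-- ===== VERDICT (by name: the statement is the Claim_ definition above) =====
theorem new_string_spec : Claim_equal_new_string := by
  intro s _
  unfold Spec_new_string new_string new_string_alt
  rw [newStringRec_eq_filter_map]
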